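-- pv_equiv track=rewrite | github.com/jdautomate/recruitee-data | src/utils/server_config.py | _normalize_accept_header
-- ===== SOURCE A (Python) =====
-- REQUIRED_MEDIA_TYPES: tuple[str, str] = ("application/json", "text/event-stream")
--
-- def _normalize_accept_header(raw_value: str | None) -> str:
--     """Ensure the Accept header contains the required media types."""
--
--     values: list[str] = []
--     seen_media_types: set[str] = set()
--
--     if raw_value:
--         for part in raw_value.split(","):
--             normalized = part.strip()
--             if not normalized:
--                 continue
--             values.append(normalized)
--             media_type = normalized.split(";", 1)[0].strip().lower()
--             seen_media_types.add(media_type)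
--
--     for media_type in REQUIRED_MEDIA_TYPES:
--         if media_type not in seen_media_types:
--             values.append(media_type)
--
--     return ", ".join(values)
-- ===== SOURCE B (Python) =====
-- REQUIRED_MEDIA_TYPES: tuple[str, str] = ("application/json", "text/event-stream")
--
--
-- def _collect(parts):
--     """Recursively keep non-empty stripped parts and flag whether each required
--     media type already occurs (two booleans instead of a set of seen types)."""
--     if not parts:
--         return [], False, False
--     rest, has_json, has_sse = _collect(parts[1:])
--     p = parts[0].strip()
--     if not p:
--         return rest, has_json, has_sse
--     media_type = p.split(";", 1)[0].strip().lower()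
--     return ([p] + rest,
--             has_json or media_type == "application/json",
--             has_sse or media_type == "text/event-stream")
--
--
-- def _normalize_accept_header(raw_value):
--     """Ensure the Accept header contains the required media types."""
--     values, has_json, has_sse = _collect(raw_value.split(",")) if raw_value else ([], False, False)
--     if not has_json:
--         values.append("application/json")
--     if not has_sse:
--         values.append("text/event-stream")
--     return ", ".join(values)
-- ===== Notes on version B (the rewrite author's own statement) =====
-- stated objective: alternative
-- what changed: Replaces A's iterative loop with a set of seen media types by a back-to-front structural recursion over the comma-split parts that threads two boolean presence flags (one per required type) and builds the values list by consing, then appends each required type only when its flag is false.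
import Mathlib
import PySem

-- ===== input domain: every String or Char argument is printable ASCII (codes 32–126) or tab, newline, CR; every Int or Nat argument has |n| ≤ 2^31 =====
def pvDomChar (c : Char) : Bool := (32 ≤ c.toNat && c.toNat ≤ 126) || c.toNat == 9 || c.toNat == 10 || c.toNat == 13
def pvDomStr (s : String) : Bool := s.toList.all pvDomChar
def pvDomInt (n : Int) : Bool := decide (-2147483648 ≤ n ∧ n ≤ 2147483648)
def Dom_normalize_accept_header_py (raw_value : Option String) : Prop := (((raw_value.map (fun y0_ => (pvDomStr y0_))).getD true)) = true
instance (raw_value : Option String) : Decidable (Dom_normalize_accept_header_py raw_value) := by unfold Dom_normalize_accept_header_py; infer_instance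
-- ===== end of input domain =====

-- B replaces A's loop-with-a-seen-set by a back-to-front structural recursion over the
-- comma-split parts that threads two boolean presence flags (alternative decomposition,
-- same return value).

-- ===== PORT A =====
def pvRequiredA : List String := ["application/json", "text/event-stream"]

-- media_type = normalized.split(";", 1)[0].strip().lower()
def pvMediaTypeA (normalized : String) : String :=
  PySem.Str.lower (PySem.Str.strip (((PySem.Str.splitMax? normalized ";" 1).getD []).headD ""))

-- body of A's first loop: one `part`, updating (values, seen_media_types)
def pvStepA (acc : List String × PySem.Set String) (part : String) :
    List String × PySem.Set String :=
  let normalized := PySem.Str.strip part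
  if normalized = "" then acc
  else (acc.1 ++ [normalized], PySem.Set.add acc.2 (pvMediaTypeA normalized))

def normalize_accept_header_py (raw_value : Option String) : String :=
  let init : List String × PySem.Set String := ([], PySem.Set.empty)
  let vsSeen :=
    match raw_value with
    | some s => if s = "" then init else ((PySem.Str.split? s ",").getD []).foldl pvStepA init
    | none => init
  let values :=
    pvRequiredA.foldl
      (fun vs media_type =>
        if PySem.Set.contains vsSeen.2 media_type then vs else vs ++ [media_type])
      vsSeen.1
  PySem.Str.join ", " values

-- ===== PORT B =====
-- p.split(";", 1)[0].strip().lower()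
def pvMediaTypeB (p : String) : String :=
  PySem.Str.lower (PySem.Str.strip (((PySem.Str.splitMax? p ";" 1).getD []).headD ""))

-- _collect: recursion on the list of parts, returning (values, has_json, has_sse)
def pvCollect : List String → List String × Bool × Bool
  | [] => ([], false, false)
  | p :: ps =>
    let r := pvCollect ps
    let q := PySem.Str.strip p
    if q = "" then r
    else
      let mt := pvMediaTypeB q
      (q :: r.1, (r.2.1 || (mt == "application/json"), r.2.2 || (mt == "text/event-stream")))

def normalize_accept_header_py_alt (raw_value : Option String) : String :=
  let c : List String × Bool × Bool :=
    match raw_value with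
    | some s => if s = "" then ([], false, false) else pvCollect ((PySem.Str.split? s ",").getD [])
    | none => ([], false, false)
  let v1 := if c.2.1 then c.1 else c.1 ++ ["application/json"]
  let v2 := if c.2.2 then v1 else v1 ++ ["text/event-stream"]
  PySem.Str.join ", " v2

-- ===== PRECONDITION & SPEC =====
def Spec_normalize_accept_header_py (raw_value : Option String) (out : String) : Prop := out = normalize_accept_header_py_alt raw_value
instance (raw_value : Option String) (out : String) : Decidable (Spec_normalize_accept_header_py raw_value out) := by unfold Spec_normalize_accept_header_py; infer_instance

-- ===== CLAIM (what is proved, stated in full; the proofs are below) =====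
def Claim_equal_normalize_accept_header_py : Prop := ∀ (raw_value : Option String), Dom_normalize_accept_header_py raw_value → Spec_normalize_accept_header_py raw_value (normalize_accept_header_py raw_value)

-- ===== LEMMAS AND PROOFS =====

-- the purely list-level content of B's recursion
def pvKeep (parts : List String) : List String :=
  (parts.map PySem.Str.strip).filter (fun p => p ≠ "")

-- B's recursion computes the kept parts plus the two any-scans over them
lemma collect_eq (parts : List String) :
    pvCollect parts =
      (pvKeep parts,
       (pvKeep parts).any (fun v => pvMediaTypeB v == "application/json"),
       (pvKeep parts).any (fun v => pvMediaTypeB v == "text/event-stream")) := by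
  induction parts with
  | nil => simp [pvCollect, pvKeep]
  | cons p ps ih =>
    by_cases h : PySem.Str.strip p = ""
    · simp [pvCollect, pvKeep, h, ih, List.filter]
    · have hk : pvKeep (p :: ps) = PySem.Str.strip p :: pvKeep ps := by
        simp [pvKeep, List.filter, h]
      simp [pvCollect, h, ih, hk, Bool.or_comm]

-- strip is idempotent, so B's media type of a stripped part is A's media type
lemma mediaB_eq_A (q : String) : pvMediaTypeB q = pvMediaTypeA q := rfl

-- A's first loop produces exactly the kept parts, with its seen set being the set of
-- their media types
lemma foldA_inv (parts : List String) (vs : List String) :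
    parts.foldl pvStepA (vs, PySem.Set.ofList (vs.map pvMediaTypeA)) =
      (vs ++ pvKeep parts,
       PySem.Set.ofList ((vs ++ pvKeep parts).map pvMediaTypeA)) := by
  induction parts generalizing vs with
  | nil => simp [pvKeep]
  | cons p ps ih =>
    by_cases h : PySem.Str.strip p = ""
    · simpa [pvStepA, h, pvKeep, List.filter] using ih vs
    · have hadd : PySem.Set.add (PySem.Set.ofList (vs.map pvMediaTypeA)) (pvMediaTypeA (PySem.Str.strip p))
          = PySem.Set.ofList ((vs ++ [PySem.Str.strip p]).map pvMediaTypeA) := by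
        simp [PySem.Set.ofList_eq_foldl, List.foldl_append]
      have hk : pvKeep (p :: ps) = PySem.Str.strip p :: pvKeep ps := by
        simp [pvKeep, List.filter, h]
      simpa [pvStepA, h, hadd, hk] using ih (vs ++ [PySem.Str.strip p])

-- membership in A's seen set agrees with the any-scan over the kept values
lemma contains_eq_any (values : List String) (r : String) :
    PySem.Set.contains (PySem.Set.ofList (values.map pvMediaTypeA)) r =
      values.any (fun v => pvMediaTypeB v == r) := by
  simp only [mediaB_eq_A]
  by_cases h : r ∈ values.map pvMediaTypeA
  · have h' : values.any (fun v => pvMediaTypeA v == r) = true := by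
      rcases List.mem_map.mp h with ⟨v, hv, hr⟩
      exact List.any_eq_true.mpr ⟨v, hv, by simp [hr]⟩
    simp [PySem.Set.mem_ofList, h, h']
  · have h' : values.any (fun v => pvMediaTypeA v == r) = false := by
      simp only [List.any_eq_false]
      intro v hv
      simp only [beq_iff_eq]
      exact fun he => h (List.mem_map.mpr ⟨v, hv, he⟩)
    simp [PySem.Set.mem_ofList, h, h']

lemma main_eq (raw_value : Option String) :
    normalize_accept_header_py raw_value = normalize_accept_header_py_alt raw_value := by
  unfold normalize_accept_header_py normalize_accept_header_py_alt
  cases raw_value with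
  | none => decide
  | some s =>
    by_cases hs : s = ""
    · simp only [hs]; decide
    · have hfold : List.foldl pvStepA ([], PySem.Set.empty) ((PySem.Str.split? s ",").getD [])
          = (pvKeep ((PySem.Str.split? s ",").getD []),
             PySem.Set.ofList ((pvKeep ((PySem.Str.split? s ",").getD [])).map pvMediaTypeA)) := by
        simpa [PySem.Set.ofList_eq_foldl, PySem.Set.empty] using
          foldA_inv ((PySem.Str.split? s ",").getD []) []
      simp only [hs, reduceIte, hfold, collect_eq, pvRequiredA,
        List.foldl_cons, List.foldl_nil, contains_eq_any]

-- ===== VERDICT (by name: the statement is the Claim_ definition above) =====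
theorem normalize_accept_header_py_spec : Claim_equal_normalize_accept_header_py := by
  intro raw_value _
  exact main_eq raw_value
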